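-- pv_equiv track=rewrite | github.com/KUkingClass/algorithm-class | Lee-Jiseung/programmers/Level 2/77885 2개 이하로 다른 비트/solution.py | solution
-- ===== SOURCE A (Python) =====
-- def solution(numbers):
--     answer = []
--
--     for number in numbers:
--         if number & 1 == 0:
--             answer.append(number+1)
--             continue
--
--         n = 1
--         while True:
--             if (number & (1 << n) == 0) and (number & (1 << (n-1))):
--                 answer.append(number + (1<<(n-1)))
--                 break
--             n += 1
--     return answer
-- ===== SOURCE B (Python) =====
-- def solution(numbers):
--     # even -> +1; odd -> add half of the lowest unset bit, computed in closed form
--     return [n + 1 if n % 2 == 0 else n + ((~n & (n + 1)) >> 1) for n in numbers]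
-- ===== Notes on version B (the rewrite author's own statement) =====
-- stated objective: simpler
-- what changed: The inner while-loop that scans bit positions for the lowest unset bit of an odd number is replaced by the closed-form bit expression (~n & (n+1)) >> 1, so B is a one-line comprehension with no inner loop.
-- outside the precondition, e.g. on solution([-1]): A does not finish within the time limit, B returns [-1]
import Mathlib
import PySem

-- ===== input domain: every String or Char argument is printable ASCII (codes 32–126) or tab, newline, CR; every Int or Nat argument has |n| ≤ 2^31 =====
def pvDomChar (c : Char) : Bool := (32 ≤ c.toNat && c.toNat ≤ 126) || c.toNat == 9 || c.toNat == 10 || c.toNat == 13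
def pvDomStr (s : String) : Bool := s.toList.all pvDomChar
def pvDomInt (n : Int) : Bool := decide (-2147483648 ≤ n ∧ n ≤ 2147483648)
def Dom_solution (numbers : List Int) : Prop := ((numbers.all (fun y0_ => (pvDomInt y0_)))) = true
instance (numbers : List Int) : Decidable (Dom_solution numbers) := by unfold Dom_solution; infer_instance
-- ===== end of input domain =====

-- B replaces A's inner bit-scanning while-loop by the closed-form expression (~n & (n+1)) >> 1 (simpler);
-- proved equal on lists not containing -1, where A's inner loop never terminates.

-- ===== PORT A =====
-- the 'while True' bit scan; the fuel argument only makes the recursion total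
-- (it is proved below never to run out on inputs satisfying Dom_ ∧ Pre_)
def scanA (number : Int) : Nat → Nat → Int
  | _, 0 => number
  | n, fuel+1 =>
    if PySem.Int.band number (1 <<< n) = 0 ∧ ¬ (PySem.Int.band number (1 <<< (n-1)) = 0) then
      number + (1 <<< (n-1))
    else
      scanA number (n+1) fuel

def solution (numbers : List Int) : List Int :=
  numbers.foldl (fun answer number =>
    if PySem.Int.band number 1 = 0 then answer ++ [number + 1]
    else answer ++ [scanA number 1 64]) []

-- ===== PORT B =====
def solution_alt (numbers : List Int) : List Int :=
  numbers.map (fun n =>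
    if PySem.Int.mod n 2 = 0 then n + 1
    else n + (PySem.Int.band (Int.not n) (n + 1)) >>> 1)

-- ===== PRECONDITION & SPEC =====
-- Pre_ excludes lists containing -1: there A's inner while-loop never terminates (-1 has no unset bit), so A returns nothing.
def Pre_solution (numbers : List Int) : Prop := (-1 : Int) ∉ numbers
instance (numbers : List Int) : Decidable (Pre_solution numbers) := by unfold Pre_solution; infer_instance
def pvWitness_solution : List Int := [3, 4, -5]

def Spec_solution (numbers : List Int) (out : List Int) : Prop := out = solution_alt numbers
instance (numbers : List Int) (out : List Int) : Decidable (Spec_solution numbers out) := by unfold Spec_solution; infer_instance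

-- ===== CLAIM (what is proved, stated in full; the proofs are below) =====
def Claim_equal_solution : Prop := ∀ (numbers : List Int), Dom_solution numbers → Pre_solution numbers → Spec_solution numbers (solution numbers)

-- ===== LEMMAS AND PROOFS =====

theorem divD1 (t u i : Nat) (h : i ≤ t) : 2^t*u / 2^i = 2^(t-i)*u := by
  rw [show (2:Nat)^t*u = 2^i*(2^(t-i)*u) by rw [← mul_assoc, ← pow_add]; congr 2; omega]
  exact Nat.mul_div_cancel_left _ (Nat.two_pow_pos i)

theorem tb_mul_lt (t u i : Nat) (h : i < t) : Nat.testBit (2^t*u) i = false := by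
  rw [Nat.testBit_eq_decide_div_mod_eq, divD1 t u i h.le]
  have : (2:Nat)^(t-i) = 2*2^(t-i-1) := by rw [← pow_succ']; congr 1; omega
  simp [this, Nat.mul_assoc, Nat.mul_mod_right]

theorem tb_mul_ge (t u i : Nat) (h : t ≤ i) : Nat.testBit (2^t*u) i = Nat.testBit u (i-t) := by
  rw [Nat.testBit_eq_decide_div_mod_eq, Nat.testBit_eq_decide_div_mod_eq,
    show (2:Nat)^i = 2^t*2^(i-t) by rw [← pow_add]; congr 1; omega,
    ← Nat.div_div_eq_div_mul, Nat.mul_div_cancel_left _ (Nat.two_pow_pos t)]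

theorem divD3 (t u : Nat) (hu : 1 ≤ u) : (2^t*u - 1) / 2^t = u - 1 := by
  have h2 : 0 < (2:Nat)^t := Nat.two_pow_pos t
  have h4 : (u-1)*2^t = 2^t*u - 2^t := by rw [Nat.sub_mul, one_mul, mul_comm]
  have h5 : 2^t ≤ 2^t*u := Nat.le_mul_of_pos_right _ (by omega)
  rw [show 2^t*u - 1 = (2^t - 1) + (u-1)*2^t by omega]
  rw [Nat.add_mul_div_right _ _ h2, Nat.div_eq_of_lt (by omega)]; omega

theorem tb_sub_one_lt (t u i : Nat) (hu : 1 ≤ u) (h : i < t) : Nat.testBit (2^t*u - 1) i = true := by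
  rw [Nat.testBit_eq_decide_div_mod_eq]
  have h2 : 0 < (2:Nat)^i := Nat.two_pow_pos i
  have h3 : 1 ≤ (2:Nat)^(t-i)*u := Nat.one_le_iff_ne_zero.2 (by positivity)
  have e : 2^t*u - 1 = (2^i - 1) + (2^(t-i)*u - 1)*2^i := by
    have e1 : (2:Nat)^t*u = 2^i*(2^(t-i)*u) := by rw [← mul_assoc, ← pow_add]; congr 2; omega
    have h4 : (2^(t-i)*u - 1)*2^i = 2^i*(2^(t-i)*u) - 2^i := by rw [Nat.sub_mul, one_mul, mul_comm]
    have h5 : 2^i ≤ 2^i*(2^(t-i)*u) := Nat.le_mul_of_pos_right _ (by omega)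
    omega
  rw [e, Nat.add_mul_div_right _ _ h2, Nat.div_eq_of_lt (by omega)]
  have : (2:Nat)^(t-i) = 2*2^(t-i-1) := by rw [← pow_succ']; congr 1; omega
  have heven : ((2:Nat)^(t-i)*u) % 2 = 0 := by simp [this, Nat.mul_assoc, Nat.mul_mod_right]
  simp; omega

theorem tb_sub_one_ge (t u i : Nat) (hu : 1 ≤ u) (h : t ≤ i) :
    Nat.testBit (2^t*u - 1) i = Nat.testBit (u-1) (i-t) := by
  rw [Nat.testBit_eq_decide_div_mod_eq, Nat.testBit_eq_decide_div_mod_eq,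
    show (2:Nat)^i = 2^t*2^(i-t) by rw [← pow_add]; congr 1; omega,
    ← Nat.div_div_eq_div_mul, divD3 t u hu]

theorem maskL (t u : Nat) (hu : u % 2 = 1) : (2^t*u) &&& (2^t*u - 1) = 2^t*(u-1) := by
  apply Nat.eq_of_testBit_eq
  intro i
  rw [Nat.testBit_land]
  rcases lt_or_ge i t with h | h
  · rw [tb_mul_lt t u i h, tb_mul_lt t (u-1) i h, Bool.false_and]
  · rw [tb_mul_ge t u i h, tb_mul_ge t (u-1) i h, tb_sub_one_ge t u i (by omega) h]
    rcases Nat.eq_or_lt_of_le h with rfl | h'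
    · simp [Nat.testBit_eq_decide_div_mod_eq]; omega
    · have hj : 1 ≤ i - t := by omega
      have heq : u / 2^(i-t) = (u-1) / 2^(i-t) := by
        rw [show u = (u-1)+1 by omega, Nat.succ_div]
        have hnd : ¬ (2^(i-t) ∣ (u-1)+1) := by
          intro hd
          have h2 : (2:Nat) ∣ 2^(i-t) := dvd_pow_self 2 (by omega)
          have := h2.trans hd
          omega
        simp [hnd]
      rw [Nat.testBit_eq_decide_div_mod_eq, Nat.testBit_eq_decide_div_mod_eq, heq, Bool.and_self]

-- bit n of an Int, Python-style two's complement
def ibit (m : Int) (n : Nat) : Bool :=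
  match m with
  | .ofNat a => a.testBit n
  | .negSucc a => !(a.testBit n)

theorem band_pow (m : Int) (n : Nat) :
    PySem.Int.band m ((2^n : Nat) : Int) = if ibit m n then ((2^n : Nat) : Int) else 0 := by
  cases m with
  | ofNat a =>
    simp only [PySem.Int.band, ibit]
    rw [if_pos (by exact Int.natCast_nonneg a), if_pos (by positivity)]
    rw [show (Int.ofNat a).toNat = a from rfl, Int.toNat_natCast, Nat.and_two_pow]
    rcases Bool.eq_false_or_eq_true (a.testBit n) with h | h <;> simp [h]
  | negSucc a =>
    simp only [PySem.Int.band, ibit]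
    rw [if_neg (by exact of_decide_eq_false rfl), if_pos (by positivity)]
    rw [show (-Int.negSucc a - 1).toNat = a by simp [Int.negSucc_eq]]
    rw [Int.toNat_natCast, Nat.two_pow_and]
    rcases Bool.eq_false_or_eq_true (a.testBit n) with h | h <;> simp [h]


theorem scan_eq (m : Int) (t : Nat) (ht : 1 ≤ t)
    (hbits : ∀ k, k < t → ibit m k = true) (hbt : ibit m t = false) :
    ∀ fuel n, 1 ≤ n → n ≤ t → t - n < fuel → scanA m n fuel = m + ((2^(t-1) : Nat) : Int) := by
  intro fuel
  induction fuel with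
  | zero => intro n _ _ h; omega
  | succ fuel ih =>
    intro n h1 h2 h3
    rcases Nat.eq_or_lt_of_le h2 with rfl | hlt
    · simp only [scanA, Nat.shiftLeft_eq, one_mul, band_pow, hbt, hbits (n-1) (by omega)]
      rw [if_pos (by simp)]
    · simp only [scanA, Nat.shiftLeft_eq, one_mul, band_pow, hbits n hlt]
      rw [if_neg (by simp)]
      exact ih (n+1) (by omega) (by omega) (by omega)

theorem bits_ofNat (a t u : Nat) (hu : u % 2 = 1) (h : a + 1 = 2^t*u) :
    (∀ k, k < t → ibit (Int.ofNat a) k = true) ∧ ibit (Int.ofNat a) t = false := by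
  have hu1 : 1 ≤ u := by omega
  have ha : a = 2^t*u - 1 := by omega
  constructor
  · intro k hk
    simp only [ibit, ha]
    exact tb_sub_one_lt t u k hu1 hk
  · simp only [ibit, ha]
    rw [tb_sub_one_ge t u t hu1 le_rfl, Nat.testBit_eq_decide_div_mod_eq]
    simp; omega

theorem bits_negSucc (a t u : Nat) (hu : u % 2 = 1) (h : a = 2^t*u) :
    (∀ k, k < t → ibit (Int.negSucc a) k = true) ∧ ibit (Int.negSucc a) t = false := by
  constructor
  · intro k hk
    simp only [ibit, h, tb_mul_lt t u k hk, Bool.not_false]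
  · simp only [ibit, h]
    rw [tb_mul_ge t u t le_rfl, Nat.testBit_eq_decide_div_mod_eq]
    simp; omega

theorem sub_mul_pow (t u : Nat) (hu : 1 ≤ u) : 2^t*u - 2^t*(u-1) = 2^t := by
  have h4 : 2^t*(u-1) = 2^t*u - 2^t := by rw [Nat.mul_sub, Nat.mul_one]
  have h5 : 2^t ≤ 2^t*u := Nat.le_mul_of_pos_right _ (by omega)
  have h2 : 0 < (2:Nat)^t := Nat.two_pow_pos t
  rw [h4]; omega

theorem mask_pos (a t u : Nat) (hu : u % 2 = 1) (h : a + 1 = 2^t*u) :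
    PySem.Int.band (Int.not (Int.ofNat a)) (Int.ofNat a + 1) = ((2^t : Nat) : Int) := by
  have hnot : Int.not (Int.ofNat a) = Int.negSucc a := rfl
  have hadd : (Int.ofNat a + 1) = ((a+1 : Nat) : Int) := by simp
  rw [hnot, hadd]
  simp only [PySem.Int.band]
  rw [if_neg (by exact of_decide_eq_false rfl), if_pos (by positivity)]
  rw [show (-Int.negSucc a - 1).toNat = a by simp [Int.negSucc_eq], Int.toNat_natCast]
  rw [h, show 2^t*u &&& a = 2^t*u &&& (2^t*u - 1) by rw [show a = 2^t*u-1 by omega]]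
  rw [maskL t u hu, sub_mul_pow t u (by omega)]

theorem mask_neg (a t u : Nat) (hu : u % 2 = 1) (h : a = 2^t*u) (ha : 1 ≤ a) :
    PySem.Int.band (Int.not (Int.negSucc a)) (Int.negSucc a + 1) = ((2^t : Nat) : Int) := by
  have hnot : Int.not (Int.negSucc a) = Int.ofNat a := rfl
  have hadd : (Int.negSucc a + 1) = -((a : Nat) : Int) := by simp [Int.negSucc_eq]
  rw [hnot, hadd]
  simp only [PySem.Int.band]
  rw [if_pos (by exact Int.natCast_nonneg a), if_neg (by simp; omega)]
  rw [show (-(-((a:Nat):Int)) - 1).toNat = a - 1 by simp]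
  rw [show (Int.ofNat a).toNat = a from rfl]
  rw [h, show 2^t*u &&& (2^t*u - 1) = 2^t*u &&& (2^t*u - 1) from rfl]
  rw [maskL t u hu, sub_mul_pow t u (by omega)]

theorem shr_one (t : Nat) (ht : 1 ≤ t) :
    (((2^t : Nat) : Int) >>> (1:Int)) = ((2^(t-1) : Nat) : Int) := by
  rw [show (1:Int) = ((1:Nat):Int) from rfl, Int.shiftRight_natCast]
  congr 1
  rw [Nat.shiftRight_eq_div_pow, Nat.pow_div ht (by norm_num)]

theorem tle32 (t u k : Nat) (h : k = 2^t*u) (hu : 1 ≤ u) (hk : k ≤ 2147483649) : t ≤ 32 := by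
  by_contra hc
  have h1 : (2:Nat)^33 ≤ 2^t := Nat.pow_le_pow_right (by norm_num) (by omega)
  have h2 : 2^t ≤ 2^t*u := Nat.le_mul_of_pos_right _ (by omega)
  have h3 : (2:Nat)^33 = 8589934592 := by norm_num
  omega

theorem elem_odd (m : Int) (hodd : ¬ PySem.Int.mod m 2 = 0) (hne : m ≠ -1)
    (hlo : -2147483648 ≤ m) (hhi : m ≤ 2147483648) :
    scanA m 1 64 = m + (PySem.Int.band (Int.not m) (m + 1)) >>> (1:Int) := by
  have hmod : PySem.Int.mod m 2 = m % 2 := by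
    show Int.fmod m 2 = m % 2
    rw [Int.fmod_eq_emod]; simp
  rw [hmod] at hodd
  have hm2 : m % 2 = 1 := by omega
  cases m with
  | ofNat a =>
    have hm2' : ((a:Nat):Int) % 2 = 1 := hm2
    have ha2 : a % 2 = 1 := by omega
    obtain ⟨t, u, huo, h⟩ := Nat.exists_eq_two_pow_mul_odd (n := a+1) (by omega)
    have hu : u % 2 = 1 := Nat.odd_iff.mp huo
    have ht : 1 ≤ t := by
      by_contra hc
      have : t = 0 := by omega
      subst this; simp at h; omega
    have hbnd : a + 1 ≤ 2147483649 := by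
      have hh : ((a:Nat):Int) ≤ 2147483648 := hhi
      omega
    have ht32 : t ≤ 32 := tle32 t u (a+1) h (by omega) hbnd
    obtain ⟨hb1, hb2⟩ := bits_ofNat a t u hu h
    rw [scan_eq (Int.ofNat a) t ht hb1 hb2 64 1 le_rfl (by omega) (by omega)]
    rw [mask_pos a t u hu h, shr_one t ht]
  | negSucc a =>
    have ha2 : a % 2 = 0 := by
      have hh : -((a:Nat):Int) - 1 = Int.negSucc a := by rw [Int.negSucc_eq]; ring
      have hm2' : (-((a:Nat):Int) - 1) % 2 = 1 := by rw [hh]; exact hm2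
      omega
    have hane : a ≠ 0 := by
      intro h0; subst h0; exact hne rfl
    obtain ⟨t, u, huo, h⟩ := Nat.exists_eq_two_pow_mul_odd (n := a) hane
    have hu : u % 2 = 1 := Nat.odd_iff.mp huo
    have ht : 1 ≤ t := by
      by_contra hc
      have : t = 0 := by omega
      subst this; simp at h; omega
    have hbnd : a ≤ 2147483649 := by
      have hh : -((a:Nat):Int) - 1 = Int.negSucc a := by rw [Int.negSucc_eq]; ring
      have hl : -2147483648 ≤ -((a:Nat):Int) - 1 := by rw [hh]; exact hlo
      omega
    have ht32 : t ≤ 32 := tle32 t u a h (by omega) hbnd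
    obtain ⟨hb1, hb2⟩ := bits_negSucc a t u hu h
    rw [scan_eq (Int.negSucc a) t ht hb1 hb2 64 1 le_rfl (by omega) (by omega)]
    rw [mask_neg a t u hu h (by omega), shr_one t ht]

theorem solution_foldl (l acc : List Int) :
    l.foldl (fun answer number =>
      if PySem.Int.band number 1 = 0 then answer ++ [number + 1]
      else answer ++ [scanA number 1 64]) acc
    = acc ++ l.map (fun n => if PySem.Int.band n 1 = 0 then n + 1 else scanA n 1 64) := by
  induction l generalizing acc with
  | nil => simp
  | cons x xs ih =>
    simp only [List.foldl, List.map]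
    by_cases h : PySem.Int.band x 1 = 0 <;> simp [h, ih]

theorem final (numbers : List Int)
    (hdom : (numbers.all (fun y0_ => (pvDomInt y0_))) = true)
    (hpre : (-1 : Int) ∉ numbers) :
    solution numbers = solution_alt numbers := by
  unfold solution solution_alt
  rw [solution_foldl, List.nil_append]
  apply List.map_congr_left
  intro n hn
  have hd : pvDomInt n = true := by
    rw [List.all_eq_true] at hdom
    exact hdom n hn
  simp only [pvDomInt, decide_eq_true_eq] at hd
  have hne : n ≠ -1 := fun h => hpre (h ▸ hn)
  rw [PySem.Int.band_one]
  by_cases hc : PySem.Int.mod n 2 = 0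
  · rw [if_pos hc, if_pos hc]
  · rw [if_neg hc, if_neg hc]
    exact elem_odd n hc hne hd.1 hd.2

-- ===== VERDICT (by name: the statement is the Claim_ definition above) =====
theorem solution_spec : Claim_equal_solution :=
  fun numbers hdom hpre => final numbers hdom hpre
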